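-- pv_equiv track=rewrite | github.com/OMIGROUPOPS/Omi-Workspace | arb-executor/tennis_v5.py | get_sizing
-- ===== SOURCE A (Python) =====
-- BABY_SIZING_MODE = True
--
-- BABY_ENTRY_SIZE = 10
--
-- BABY_DCA_SIZE = 5
--
-- SIZING_CONFIG = {
--     # (category, tier_lo, tier_hi): (entry_size, dca_size)
--     #
--     # OPTION A — deployed 2026-04-10 after 5,889-event Kalshi tape
--     # validation showed the prior 14-cell deploy was overfit on
--     # poisoned matches-table data. The clean dataset shows 18 of
--     # 28 cells are net-negative; only 10 cells have positive EV.
--     # Of those 10, only 4 have EV >= $1.50 with N >= 100 — those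
--     # are doubled. The other 6 are kept at standard. WTA_CHALL
--     # 80-84 has small N=44, kept standard despite high EV.
--     #
--     # All 18 negative-EV cells are SKIPPED. Skipping these cells
--     # alone saves ~$60/day vs the prior bleeding deploy.
--
--     # ----- DOUBLED 80/40 (top 3 cells, EV >= $1.50, N >= 100) -----
--     ("ATP_CHALL", 65, 69): (80, 40),  # EV=+$3.47 WR=76% N=465
--     ("ATP_CHALL", 70, 74): (80, 40),  # EV=+$1.71 WR=77% N=412
--     ("WTA_MAIN",  60, 64): (80, 40),  # EV=+$2.98 WR=70% N=154
--
--     # ----- STANDARD 40/20 (positive but smaller EV or smaller N) -----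
--     ("WTA_CHALL", 80, 84): (40, 20),  # EV=+$2.57 WR=92% N=48 (small N)
--     ("ATP_MAIN",  65, 69): (40, 20),  # EV=+$0.86 WR=70% N=152
--     ("WTA_CHALL", 85, 89): (40, 20),  # EV=+$0.65 WR=90% N=71
--     ("ATP_CHALL", 60, 64): (40, 20),  # EV=+$0.78 WR=65% N=527
--     ("ATP_MAIN",  55, 59): (40, 20),  # EV=+$0.38 WR=59% N=169
--     ("WTA_MAIN",  65, 69): (40, 20),  # EV=+$0.04 WR=67% N=155 (borderline)
--
--     # ----- STANDARD 40/0 (entry only, no DCA) -----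
--     ("WTA_CHALL", 75, 79): (40, 0),   # Config A best, EV+$0.42 WR=79% N=42
--
--     # ----- SKIP cells (negative EV, N >= 30) -----
--     ("ATP_MAIN",  60, 64): (0, 0),    # EV=-$0.22
--     ("ATP_MAIN",  70, 74): (0, 0),    # EV=-$1.10  ← was DOUBLED, bleeding
--     ("ATP_MAIN",  75, 79): (0, 0),    # EV=-$1.10  ← was ENTRY-only
--     ("ATP_MAIN",  80, 84): (0, 0),    # EV=-$4.47  ← was ENTRY-only
--     ("ATP_MAIN",  85, 89): (0, 0),    # EV=-$6.61  ← was ENTRY-only, worst cell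
--     ("ATP_CHALL", 55, 59): (0, 0),    # EV=-$2.13
--     ("ATP_CHALL", 75, 79): (0, 0),    # EV=-$0.57  ← was ENTRY-only
--     ("ATP_CHALL", 80, 84): (0, 0),    # EV=-$0.91
--     ("ATP_CHALL", 85, 89): (0, 0),    # EV=-$3.21
--     ("WTA_MAIN",  55, 59): (0, 0),    # EV=-$0.21  ← was DOUBLED
--     ("WTA_MAIN",  70, 74): (0, 0),    # EV=-$3.68
--     ("WTA_MAIN",  75, 79): (0, 0),    # EV=-$1.71  ← was ENTRY-only
--     ("WTA_MAIN",  80, 84): (0, 0),    # EV=-$2.82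
--     ("WTA_MAIN",  85, 89): (0, 0),    # EV=-$5.10
--     ("WTA_CHALL", 55, 59): (0, 0),    # EV=-$4.84  ← was DOUBLED
--     ("WTA_CHALL", 60, 64): (0, 0),    # EV=-$3.87
--     ("WTA_CHALL", 65, 69): (0, 0),    # EV=-$2.50  ← was DOUBLED
--     ("WTA_CHALL", 70, 74): (0, 0),    # EV=-$4.29
-- }
--
-- def get_sizing(category, bid_price):
--     # H14 fix (2026-04-11): honor BABY_SIZING_MODE here so callers don't have
--     # to remember to override. Previously the reconcile legacy-fallback path
--     # called this and got raw (40, 20), which was the root cause of the MON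
--     # post-restart over-DCA incident (20ct instead of 5ct baby).
--     for (cat, lo, hi), (es, ds) in SIZING_CONFIG.items():
--         if cat == category and lo <= bid_price <= hi:
--             if BABY_SIZING_MODE:
--                 return (BABY_ENTRY_SIZE, BABY_DCA_SIZE if ds > 0 else 0)
--             return (es, ds)
--     if BABY_SIZING_MODE:
--         return (BABY_ENTRY_SIZE, BABY_DCA_SIZE)
--     return (40, 20)  # default standard
-- ===== SOURCE B (Python) =====
-- BABY_SIZING_MODE = True
--
-- BABY_ENTRY_SIZE = 10
--
-- BABY_DCA_SIZE = 5
--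
-- # Compact grid encoding: every tier is a 5-wide bucket from 55 to 89, so each
-- # category carries one code per bucket; codes are decoded through DECODE.
-- # 0 = skip (0,0), 1 = standard (40,20), 2 = doubled (80,40), 3 = entry-only (40,0).
-- CODE_ROWS = {
--     "ATP_CHALL": [0, 1, 2, 2, 0, 0, 0],
--     "ATP_MAIN":  [1, 0, 1, 0, 0, 0, 0],
--     "WTA_MAIN":  [0, 2, 1, 0, 0, 0, 0],
--     "WTA_CHALL": [0, 0, 0, 0, 3, 1, 1],
-- }
--
-- DECODE = [(0, 0), (40, 20), (80, 40), (40, 0)]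
--
-- def get_sizing(category, bid_price):
--     row = CODE_ROWS.get(category)
--     if row is not None and 55 <= bid_price <= 89:
--         es, ds = DECODE[row[(bid_price - 55) // 5]]
--     else:
--         es, ds = (40, 20)
--     if BABY_SIZING_MODE:
--         return (BABY_ENTRY_SIZE, BABY_DCA_SIZE if ds > 0 else 0)
--     return (es, ds)
-- ===== Notes on version B (the rewrite author's own statement) =====
-- stated objective: alternative
-- what changed: Replaces the linear scan over the 28 (category, lo, hi) interval entries by a compact per-category code row (one code per 5-wide bucket 55..89) indexed arithmetically with (bid_price-55)//5 and decoded through a 4-entry table.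
import Mathlib
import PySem

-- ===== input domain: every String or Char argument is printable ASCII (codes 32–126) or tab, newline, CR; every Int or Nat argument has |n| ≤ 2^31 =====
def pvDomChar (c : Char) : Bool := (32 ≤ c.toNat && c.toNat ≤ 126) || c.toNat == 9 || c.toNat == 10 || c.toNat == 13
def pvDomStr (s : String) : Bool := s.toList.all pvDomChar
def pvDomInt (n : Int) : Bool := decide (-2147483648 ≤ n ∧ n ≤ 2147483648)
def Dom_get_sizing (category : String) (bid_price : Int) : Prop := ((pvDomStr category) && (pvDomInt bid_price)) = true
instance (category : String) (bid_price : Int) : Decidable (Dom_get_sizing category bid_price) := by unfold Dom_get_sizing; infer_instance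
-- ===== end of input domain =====

-- B replaces A's linear interval scan of SIZING_CONFIG by a per-category code row
-- indexed arithmetically by bucket ((bid_price-55)//5) and a 4-entry decode table;
-- objective: alternative (different data representation, same values).


-- ===== PORT A =====
def BABY_SIZING_MODE : Bool := true
def BABY_ENTRY_SIZE : Int := 10
def BABY_DCA_SIZE : Int := 5

-- SIZING_CONFIG.items() (keys are distinct, so the dict is its literal item list)
def SIZING_CONFIG : List ((String × Int × Int) × (Int × Int)) :=
  [ (("ATP_CHALL", 65, 69), (80, 40)), (("ATP_CHALL", 70, 74), (80, 40)),
    (("WTA_MAIN",  60, 64), (80, 40)),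
    (("WTA_CHALL", 80, 84), (40, 20)), (("ATP_MAIN",  65, 69), (40, 20)),
    (("WTA_CHALL", 85, 89), (40, 20)), (("ATP_CHALL", 60, 64), (40, 20)),
    (("ATP_MAIN",  55, 59), (40, 20)), (("WTA_MAIN",  65, 69), (40, 20)),
    (("WTA_CHALL", 75, 79), (40, 0)),
    (("ATP_MAIN",  60, 64), (0, 0)),   (("ATP_MAIN",  70, 74), (0, 0)),
    (("ATP_MAIN",  75, 79), (0, 0)),   (("ATP_MAIN",  80, 84), (0, 0)),
    (("ATP_MAIN",  85, 89), (0, 0)),   (("ATP_CHALL", 55, 59), (0, 0)),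
    (("ATP_CHALL", 75, 79), (0, 0)),   (("ATP_CHALL", 80, 84), (0, 0)),
    (("ATP_CHALL", 85, 89), (0, 0)),   (("WTA_MAIN",  55, 59), (0, 0)),
    (("WTA_MAIN",  70, 74), (0, 0)),   (("WTA_MAIN",  75, 79), (0, 0)),
    (("WTA_MAIN",  80, 84), (0, 0)),   (("WTA_MAIN",  85, 89), (0, 0)),
    (("WTA_CHALL", 55, 59), (0, 0)),   (("WTA_CHALL", 60, 64), (0, 0)),
    (("WTA_CHALL", 65, 69), (0, 0)),   (("WTA_CHALL", 70, 74), (0, 0)) ]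

-- the for-loop with early return; the [] case is the fall-through default after the loop
def pvScanA (category : String) (bid_price : Int) :
    List ((String × Int × Int) × (Int × Int)) → Int × Int
  | [] => if BABY_SIZING_MODE then (BABY_ENTRY_SIZE, BABY_DCA_SIZE) else (40, 20)
  | ((cat, lo, hi), (es, ds)) :: rest =>
      if cat = category ∧ lo ≤ bid_price ∧ bid_price ≤ hi then
        if BABY_SIZING_MODE then
          (BABY_ENTRY_SIZE, if ds > 0 then BABY_DCA_SIZE else 0)
        else (es, ds)
      else pvScanA category bid_price rest

def get_sizing (category : String) (bid_price : Int) : Int × Int :=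
  pvScanA category bid_price SIZING_CONFIG

-- ===== PORT B =====
-- CODE_ROWS: one code per 5-wide bucket, buckets 55..89
def pvCodeRows : PySem.Dict String (List Int) :=
  PySem.Dict.ofList
    [ ("ATP_CHALL", [0, 1, 2, 2, 0, 0, 0]),
      ("ATP_MAIN",  [1, 0, 1, 0, 0, 0, 0]),
      ("WTA_MAIN",  [0, 2, 1, 0, 0, 0, 0]),
      ("WTA_CHALL", [0, 0, 0, 0, 3, 1, 1]) ]

def pvDecode : List (Int × Int) := [(0, 0), (40, 20), (80, 40), (40, 0)]

def get_sizing_alt (category : String) (bid_price : Int) : Int × Int :=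
  let esds :=
    match PySem.Dict.get? pvCodeRows category with
    | some row =>
        if 55 ≤ bid_price ∧ bid_price ≤ 89 then
          -- both indexings are always in range on this branch (the guard bounds the
          -- bucket to 0..6 and every code is 0..3), so the .getD defaults are dead
          (PySem.List.pyGet? pvDecode
            ((PySem.List.pyGet? row (PySem.Int.floordiv (bid_price - 55) 5)).getD 0)).getD (40, 20)
        else (40, 20)
    | none => (40, 20)
  if BABY_SIZING_MODE then
    (BABY_ENTRY_SIZE, if esds.2 > 0 then BABY_DCA_SIZE else 0)
  else esds

-- ===== PRECONDITION & SPEC =====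
def Spec_get_sizing (category : String) (bid_price : Int) (out : Int × Int) : Prop := out = get_sizing_alt category bid_price
instance (category : String) (bid_price : Int) (out : Int × Int) : Decidable (Spec_get_sizing category bid_price out) := by unfold Spec_get_sizing; infer_instance

-- ===== CLAIM =====
def Claim_equal_get_sizing : Prop := ∀ (category : String) (bid_price : Int), Dom_get_sizing category bid_price → Spec_get_sizing category bid_price (get_sizing category bid_price)

-- ===== LEMMAS AND PROOFS =====

-- canonical value of A per fixed category, as intervals over bid_price
set_option maxHeartbeats 1000000 in
theorem pvA_eval_atpchall (bp : Int) : get_sizing "ATP_CHALL" bp =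
    (if 60 ≤ bp ∧ bp ≤ 74 then ((10:Int),(5:Int)) else if 55 ≤ bp ∧ bp ≤ 89 then (10,0) else (10,5)) := by
  simp only [get_sizing, SIZING_CONFIG, pvScanA, BABY_SIZING_MODE, BABY_ENTRY_SIZE,
    BABY_DCA_SIZE, String.reduceEq, false_and, true_and, if_false, if_true]
  norm_num
  split_ifs <;> first | rfl | omega

set_option maxHeartbeats 1000000 in
theorem pvA_eval_atpmain (bp : Int) : get_sizing "ATP_MAIN" bp =
    (if (55 ≤ bp ∧ bp ≤ 59) ∨ (65 ≤ bp ∧ bp ≤ 69) then ((10:Int),(5:Int)) else if 55 ≤ bp ∧ bp ≤ 89 then (10,0) else (10,5)) := by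
  simp only [get_sizing, SIZING_CONFIG, pvScanA, BABY_SIZING_MODE, BABY_ENTRY_SIZE,
    BABY_DCA_SIZE, String.reduceEq, false_and, true_and, if_false, if_true]
  norm_num
  split_ifs <;> first | rfl | omega

set_option maxHeartbeats 1000000 in
theorem pvA_eval_wtamain (bp : Int) : get_sizing "WTA_MAIN" bp =
    (if 60 ≤ bp ∧ bp ≤ 69 then ((10:Int),(5:Int)) else if 55 ≤ bp ∧ bp ≤ 89 then (10,0) else (10,5)) := by
  simp only [get_sizing, SIZING_CONFIG, pvScanA, BABY_SIZING_MODE, BABY_ENTRY_SIZE,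
    BABY_DCA_SIZE, String.reduceEq, false_and, true_and, if_false, if_true]
  norm_num
  split_ifs <;> first | rfl | omega

set_option maxHeartbeats 1000000 in
theorem pvA_eval_wtachall (bp : Int) : get_sizing "WTA_CHALL" bp =
    (if 80 ≤ bp ∧ bp ≤ 89 then ((10:Int),(5:Int)) else if 55 ≤ bp ∧ bp ≤ 89 then (10,0) else (10,5)) := by
  simp only [get_sizing, SIZING_CONFIG, pvScanA, BABY_SIZING_MODE, BABY_ENTRY_SIZE,
    BABY_DCA_SIZE, String.reduceEq, false_and, true_and, if_false, if_true]
  norm_num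
  split_ifs <;> first | rfl | omega

-- canonical value of B per fixed category: bucket the price, decode the code row
set_option maxHeartbeats 1000000 in
theorem pvB_eval_atpchall (bp : Int) : get_sizing_alt "ATP_CHALL" bp =
    (if 60 ≤ bp ∧ bp ≤ 74 then ((10:Int),(5:Int)) else if 55 ≤ bp ∧ bp ≤ 89 then (10,0) else (10,5)) := by
  have hq : (PySem.Int.floordiv (bp - 55) 5) * 5 ≤ bp - 55 ∧
      bp - 55 < (PySem.Int.floordiv (bp - 55) 5 + 1) * 5 :=
    (PySem.Int.floordiv_eq_iff_of_pos (by norm_num)).1 rfl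
  have hrow : PySem.Dict.get? pvCodeRows "ATP_CHALL" = some [0,1,2,2,0,0,0] := by decide
  obtain ⟨hq1, hq2⟩ := hq
  unfold get_sizing_alt
  by_cases hr : 55 ≤ bp ∧ bp ≤ 89
  · simp only [hrow, if_pos hr]
    generalize hg : PySem.Int.floordiv (bp - 55) 5 = t at hq1 hq2 ⊢
    have ht0 : 0 ≤ t := by omega
    have ht6 : t ≤ 6 := by omega
    interval_cases t <;>
      first
        | (show ((10:Int),(5:Int)) = _ ; split_ifs <;> first | rfl | omega)
        | (show ((10:Int),(0:Int)) = _ ; split_ifs <;> first | rfl | omega)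
  · simp only [hrow, if_neg hr]
    show ((10:Int),(5:Int)) = _
    split_ifs <;> first | rfl | omega

set_option maxHeartbeats 1000000 in
theorem pvB_eval_atpmain (bp : Int) : get_sizing_alt "ATP_MAIN" bp =
    (if (55 ≤ bp ∧ bp ≤ 59) ∨ (65 ≤ bp ∧ bp ≤ 69) then ((10:Int),(5:Int)) else if 55 ≤ bp ∧ bp ≤ 89 then (10,0) else (10,5)) := by
  have hq : (PySem.Int.floordiv (bp - 55) 5) * 5 ≤ bp - 55 ∧
      bp - 55 < (PySem.Int.floordiv (bp - 55) 5 + 1) * 5 :=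
    (PySem.Int.floordiv_eq_iff_of_pos (by norm_num)).1 rfl
  have hrow : PySem.Dict.get? pvCodeRows "ATP_MAIN" = some [1,0,1,0,0,0,0] := by decide
  obtain ⟨hq1, hq2⟩ := hq
  unfold get_sizing_alt
  by_cases hr : 55 ≤ bp ∧ bp ≤ 89
  · simp only [hrow, if_pos hr]
    generalize hg : PySem.Int.floordiv (bp - 55) 5 = t at hq1 hq2 ⊢
    have ht0 : 0 ≤ t := by omega
    have ht6 : t ≤ 6 := by omega
    interval_cases t <;>
      first
        | (show ((10:Int),(5:Int)) = _ ; split_ifs <;> first | rfl | omega)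
        | (show ((10:Int),(0:Int)) = _ ; split_ifs <;> first | rfl | omega)
  · simp only [hrow, if_neg hr]
    show ((10:Int),(5:Int)) = _
    split_ifs <;> first | rfl | omega

set_option maxHeartbeats 1000000 in
theorem pvB_eval_wtamain (bp : Int) : get_sizing_alt "WTA_MAIN" bp =
    (if 60 ≤ bp ∧ bp ≤ 69 then ((10:Int),(5:Int)) else if 55 ≤ bp ∧ bp ≤ 89 then (10,0) else (10,5)) := by
  have hq : (PySem.Int.floordiv (bp - 55) 5) * 5 ≤ bp - 55 ∧
      bp - 55 < (PySem.Int.floordiv (bp - 55) 5 + 1) * 5 :=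
    (PySem.Int.floordiv_eq_iff_of_pos (by norm_num)).1 rfl
  have hrow : PySem.Dict.get? pvCodeRows "WTA_MAIN" = some [0,2,1,0,0,0,0] := by decide
  obtain ⟨hq1, hq2⟩ := hq
  unfold get_sizing_alt
  by_cases hr : 55 ≤ bp ∧ bp ≤ 89
  · simp only [hrow, if_pos hr]
    generalize hg : PySem.Int.floordiv (bp - 55) 5 = t at hq1 hq2 ⊢
    have ht0 : 0 ≤ t := by omega
    have ht6 : t ≤ 6 := by omega
    interval_cases t <;>
      first
        | (show ((10:Int),(5:Int)) = _ ; split_ifs <;> first | rfl | omega)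
        | (show ((10:Int),(0:Int)) = _ ; split_ifs <;> first | rfl | omega)
  · simp only [hrow, if_neg hr]
    show ((10:Int),(5:Int)) = _
    split_ifs <;> first | rfl | omega

set_option maxHeartbeats 1000000 in
theorem pvB_eval_wtachall (bp : Int) : get_sizing_alt "WTA_CHALL" bp =
    (if 80 ≤ bp ∧ bp ≤ 89 then ((10:Int),(5:Int)) else if 55 ≤ bp ∧ bp ≤ 89 then (10,0) else (10,5)) := by
  have hq : (PySem.Int.floordiv (bp - 55) 5) * 5 ≤ bp - 55 ∧
      bp - 55 < (PySem.Int.floordiv (bp - 55) 5 + 1) * 5 :=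
    (PySem.Int.floordiv_eq_iff_of_pos (by norm_num)).1 rfl
  have hrow : PySem.Dict.get? pvCodeRows "WTA_CHALL" = some [0,0,0,0,3,1,1] := by decide
  obtain ⟨hq1, hq2⟩ := hq
  unfold get_sizing_alt
  by_cases hr : 55 ≤ bp ∧ bp ≤ 89
  · simp only [hrow, if_pos hr]
    generalize hg : PySem.Int.floordiv (bp - 55) 5 = t at hq1 hq2 ⊢
    have ht0 : 0 ≤ t := by omega
    have ht6 : t ≤ 6 := by omega
    interval_cases t <;>
      first
        | (show ((10:Int),(5:Int)) = _ ; split_ifs <;> first | rfl | omega)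
        | (show ((10:Int),(0:Int)) = _ ; split_ifs <;> first | rfl | omega)
  · simp only [hrow, if_neg hr]
    show ((10:Int),(5:Int)) = _
    split_ifs <;> first | rfl | omega

set_option maxHeartbeats 1000000 in
theorem pv_main (category : String) (bid_price : Int) :
    get_sizing category bid_price = get_sizing_alt category bid_price := by
  by_cases h1 : "ATP_CHALL" = category
  · rw [← h1, pvA_eval_atpchall, pvB_eval_atpchall]
  by_cases h2 : "ATP_MAIN" = category
  · rw [← h2, pvA_eval_atpmain, pvB_eval_atpmain]
  by_cases h3 : "WTA_MAIN" = category
  · rw [← h3, pvA_eval_wtamain, pvB_eval_wtamain]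
  by_cases h4 : "WTA_CHALL" = category
  · rw [← h4, pvA_eval_wtachall, pvB_eval_wtachall]
  have hnone : PySem.Dict.get? pvCodeRows category = none := by
    have hitems : pvCodeRows.items =
        [ ("ATP_CHALL", [0, 1, 2, 2, 0, 0, 0]),
          ("ATP_MAIN",  [1, 0, 1, 0, 0, 0, 0]),
          ("WTA_MAIN",  [0, 2, 1, 0, 0, 0, 0]),
          ("WTA_CHALL", [0, 0, 0, 0, 3, 1, 1]) ] := by decide
    have hb1 : ("ATP_CHALL" == category) = false := by simpa using h1
    have hb2 : ("ATP_MAIN" == category) = false := by simpa using h2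
    have hb3 : ("WTA_MAIN" == category) = false := by simpa using h3
    have hb4 : ("WTA_CHALL" == category) = false := by simpa using h4
    simp [PySem.Dict.get?, hitems, List.find?, hb1, hb2, hb3, hb4]
  simp [get_sizing, get_sizing_alt, SIZING_CONFIG, pvScanA, hnone, h1, h2, h3, h4,
    BABY_SIZING_MODE, BABY_ENTRY_SIZE, BABY_DCA_SIZE]

-- ===== VERDICT =====
theorem get_sizing_spec : Claim_equal_get_sizing := by
  intro category bid_price _
  unfold Spec_get_sizing
  exact pv_main category bid_price
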